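-- pv_equiv track=rewrite | github.com/indibit-eu/tba3 | mock-server/api/impl/shared.py | resolve_requested_types
-- ===== SOURCE A (Python) =====
-- def resolve_requested_types(type_param: str | None) -> tuple[bool, bool]:
--     """Parse type param and return (include_group, include_students).
--
--     Default (no type param): include group only.
--     type=students: include students only.
--     type=group,students: include both.
--     """
--     if not type_param:
--         requested: set[str] = set()
--     else:
--         requested = {t.strip().lower() for t in type_param.split(",") if t.strip()}
--     include_group = "students" not in requested or "group" in requested
--     include_students = "students" in requested
--     return include_group, include_students
-- ===== SOURCE B (Python) =====
-- def resolve_requested_types(type_param):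
--     """Parse type param and return (include_group, include_students).
--
--     Character-level scanner: no split(), no set; tokens are buffered and
--     finalised at each comma (a sentinel comma flushes the last token).
--     """
--     has_group = False
--     has_students = False
--     if type_param is not None:
--         buf = []
--         for ch in type_param + ",":
--             if ch == ",":
--                 t = "".join(buf).strip().lower()
--                 if t == "group":
--                     has_group = True
--                 elif t == "students":
--                     has_students = True
--                 buf = []
--             else:
--                 buf.append(ch)
--     return (not has_students or has_group, has_students)
-- ===== Notes on version B (the rewrite author's own statement) =====
-- stated objective: alternative
-- what changed: Replaces split()+set-comprehension+membership queries with a character-level scanner: one pass over the characters of type_param plus a sentinel comma, buffering a token and setting two flags when it is flushed at each comma; no split, no set, no token list survives.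
import Mathlib
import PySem

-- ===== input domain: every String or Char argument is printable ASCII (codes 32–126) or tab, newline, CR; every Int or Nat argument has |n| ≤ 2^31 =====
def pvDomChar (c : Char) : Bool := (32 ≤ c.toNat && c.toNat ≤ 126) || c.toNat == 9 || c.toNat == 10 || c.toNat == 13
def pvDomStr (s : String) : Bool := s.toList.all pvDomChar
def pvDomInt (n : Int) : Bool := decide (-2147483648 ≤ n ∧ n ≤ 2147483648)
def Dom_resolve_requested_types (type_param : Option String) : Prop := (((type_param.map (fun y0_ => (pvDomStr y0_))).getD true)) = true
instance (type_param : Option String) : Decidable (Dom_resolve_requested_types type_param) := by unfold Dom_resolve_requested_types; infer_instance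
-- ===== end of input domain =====

-- B replaces A's split()+set+membership queries with a character-level scanner that
-- flushes a buffered token at each comma and keeps two flags (objective: alternative).

-- ===== PORT A =====
def resolve_requested_types (type_param : Option String) : Bool × Bool :=
  let requested : PySem.Set String :=
    match type_param with
    | none => PySem.Set.empty
    | some s =>
      if s = "" then PySem.Set.empty
      else
        ((PySem.Str.split? s ",").getD []).foldl
          (fun acc t =>
            if PySem.Str.strip t ≠ "" then
              PySem.Set.add acc (PySem.Str.lower (PySem.Str.strip t))
            else acc)
          PySem.Set.empty
  let include_group := !(PySem.Set.contains requested "students") || PySem.Set.contains requested "group"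
  let include_students := PySem.Set.contains requested "students"
  (include_group, include_students)

-- ===== PORT B =====
-- flush of the buffered token: t = "".join(buf).strip().lower(), set a flag if it matches
def pvFlush (p : Bool × Bool) (buf : List Char) : Bool × Bool :=
  let t := PySem.Chars.lower (PySem.Chars.strip buf)
  if t = "group".toList then (true, p.2)
  else if t = "students".toList then (p.1, true)
  else p

-- the character loop of Source B: buffer chars, flush at each ','
def pvScan : List Char → List Char → Bool × Bool → Bool × Bool
  | [], _, p => p
  | c :: rest, buf, p =>
    if c = ',' then pvScan rest [] (pvFlush p buf)
    else pvScan rest (buf ++ [c]) p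

def resolve_requested_types_alt (type_param : Option String) : Bool × Bool :=
  let flags : Bool × Bool :=
    match type_param with
    | none => (false, false)
    | some s => pvScan (s.toList ++ [',']) [] (false, false)   -- loop over type_param + ","
  (!flags.2 || flags.1, flags.2)

-- ===== PRECONDITION & SPEC =====
def Spec_resolve_requested_types (type_param : Option String) (out : Bool × Bool) : Prop := out = resolve_requested_types_alt type_param
instance (type_param : Option String) (out : Bool × Bool) : Decidable (Spec_resolve_requested_types type_param out) := by unfold Spec_resolve_requested_types; infer_instance

-- ===== CLAIM (what is proved, stated in full; the proofs are below) =====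
def Claim_equal_resolve_requested_types : Prop := ∀ (type_param : Option String), Dom_resolve_requested_types type_param → Spec_resolve_requested_types type_param (resolve_requested_types type_param)

-- ===== LEMMAS AND PROOFS =====

-- mathematical tokenizer: the comma-separated tokens of l, with cur the token prefix read so far
def pvToks : List Char → List Char → List (List Char)
  | cur, [] => [cur]
  | cur, c :: rest => if c = ',' then cur :: pvToks [] rest else pvToks (cur ++ [c]) rest

-- B's scanner = fold of pvFlush over the tokens
theorem pvScan_toks (l : List Char) : ∀ (buf : List Char) (p : Bool × Bool),
    pvScan (l ++ [',']) buf p = (pvToks buf l).foldl pvFlush p := by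
  induction l with
  | nil => intro buf p; simp [pvScan, pvToks]
  | cons c rest ih =>
    intro buf p
    by_cases h : c = ','
    · simp [pvScan, pvToks, h, ih]
    · simp [pvScan, pvToks, h, ih]

-- A's split (fuel-based splitOn.go) computes pvToks
theorem splitOn_go_toks (fuel : Nat) : ∀ (l cur : List Char) (acc : List (List Char)),
    l.length ≤ fuel →
    PySem.Chars.splitOn.go [','] fuel l cur acc = acc.reverse ++ pvToks cur.reverse l := by
  induction fuel with
  | zero =>
    intro l cur acc h
    have : l = [] := List.eq_nil_of_length_eq_zero (Nat.le_zero.mp h)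
    subst this
    simp [PySem.Chars.splitOn.go, pvToks]
  | succ f ih =>
    intro l cur acc h
    cases l with
    | nil => simp [PySem.Chars.splitOn.go, pvToks]
    | cons c rest =>
      by_cases hc : c = ','
      · subst hc
        have hpre : List.isPrefixOf [','] (',' :: rest) = true := by
          simp [List.isPrefixOf]
        simp only [PySem.Chars.splitOn.go, hpre, if_pos]
        rw [show List.drop (List.length [',']) (',' :: rest) = rest from rfl]
        rw [ih rest [] (cur.reverse :: acc) (by simpa using Nat.le_of_succ_le_succ h)]
        simp [pvToks]
      · have hpre : List.isPrefixOf [','] (c :: rest) = false := by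
          simp [List.isPrefixOf]; exact fun hh => absurd hh.symm hc
        simp only [PySem.Chars.splitOn.go, hpre]
        rw [if_neg (by simp)]
        rw [ih rest (c :: cur) acc (by simpa using Nat.le_of_succ_le_succ h)]
        simp [pvToks, hc]

theorem splitOn_toks (l : List Char) : PySem.Chars.splitOn l [','] = pvToks [] l := by
  unfold PySem.Chars.splitOn
  rw [splitOn_go_toks (l.length + 1) l [] [] (Nat.le_succ _)]
  rfl

-- A's set-building fold, membership characterised by a Bool `any` over the tokens
theorem A_fold_contains (c : String) (ts : List String) (s : PySem.Set String) :
    PySem.Set.contains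
      (ts.foldl
        (fun acc t =>
          if PySem.Str.strip t ≠ "" then
            PySem.Set.add acc (PySem.Str.lower (PySem.Str.strip t))
          else acc) s) c
    = (PySem.Set.contains s c
        || ts.any (fun t => (PySem.Str.strip t != "") && (PySem.Str.lower (PySem.Str.strip t) == c))) := by
  induction ts generalizing s with
  | nil => simp
  | cons t ts ih =>
    simp only [List.foldl_cons, List.any_cons]
    by_cases h : PySem.Str.strip t = ""
    · rw [if_neg (by simp [h]), ih]
      simp [h]
    · have hne : (PySem.Str.strip t != "") = true := by simp [h]
      have hadd : PySem.Set.contains (PySem.Set.add s (PySem.Str.lower (PySem.Str.strip t))) c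
          = (PySem.Set.contains s c || (PySem.Str.lower (PySem.Str.strip t) == c)) := by
        rw [PySem.Set.add_eq_ite]
        by_cases hm : PySem.Str.lower (PySem.Str.strip t) ∈ s
        · by_cases hc : PySem.Str.lower (PySem.Str.strip t) = c
          · subst hc; simp [hm]
          · simp [PySem.Set.contains_eq_listContains, hm, hc]
        · by_cases hc : PySem.Str.lower (PySem.Str.strip t) = c
          · subst hc; simp [hm]
          · simp [PySem.Set.contains_eq_listContains, hm, hc, Ne.symm hc]
      rw [if_pos h, ih, hadd, hne]
      simp [Bool.or_assoc]

-- B's flush fold computed in closed form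
theorem flush_fold (ts : List (List Char)) (p : Bool × Bool) :
    ts.foldl pvFlush p
    = (p.1 || ts.any (fun t => PySem.Chars.lower (PySem.Chars.strip t) == "group".toList),
       p.2 || ts.any (fun t => PySem.Chars.lower (PySem.Chars.strip t) == "students".toList)) := by
  induction ts generalizing p with
  | nil => simp
  | cons t ts ih =>
    simp only [List.foldl_cons, List.any_cons]
    rw [ih]
    unfold pvFlush
    by_cases hg : PySem.Chars.lower (PySem.Chars.strip t) = "group".toList
    · rw [if_pos hg]
      have h1 : (PySem.Chars.lower (PySem.Chars.strip t) == "group".toList) = true :=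
        beq_iff_eq.mpr hg
      have h2 : (PySem.Chars.lower (PySem.Chars.strip t) == "students".toList) = false := by
        rw [hg]; decide
      rw [h1, h2]; simp
    · rw [if_neg hg]
      have h1 : (PySem.Chars.lower (PySem.Chars.strip t) == "group".toList) = false :=
        beq_eq_false_iff_ne.mpr hg
      by_cases hs : PySem.Chars.lower (PySem.Chars.strip t) = "students".toList
      · rw [if_pos hs]
        have h2 : (PySem.Chars.lower (PySem.Chars.strip t) == "students".toList) = true :=
          beq_iff_eq.mpr hs
        rw [h1, h2]; simp
      · rw [if_neg hs]
        have h2 : (PySem.Chars.lower (PySem.Chars.strip t) == "students".toList) = false :=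
          beq_eq_false_iff_ne.mpr hs
        rw [h1, h2]; simp

-- the A-side per-token predicate, read on the char level, with the emptiness guard dropped
theorem pred_bridge (w : String) (hw : w.toList ≠ []) (t : List Char) :
    ((PySem.Str.strip (String.ofList t) != "") && (PySem.Str.lower (PySem.Str.strip (String.ofList t)) == w))
    = (PySem.Chars.lower (PySem.Chars.strip t) == w.toList) := by
  have hstrip : (PySem.Str.strip (String.ofList t)).toList = PySem.Chars.strip t := by
    simp [PySem.Str.toList_strip]
  by_cases h : PySem.Chars.lower (PySem.Chars.strip t) = w.toList
  · have hne : PySem.Str.strip (String.ofList t) ≠ "" := by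
      intro he
      have hnil : PySem.Chars.strip t = [] := by rw [← hstrip, he]; rfl
      rw [hnil] at h
      simp [PySem.Chars.lower] at h
      exact hw (by simp [← h])
    have hlow : PySem.Str.lower (PySem.Str.strip (String.ofList t)) = w := by
      apply String.toList_injective
      rw [PySem.Str.toList_lower, hstrip, h]
    simp [hne, hlow, h]
  · have hlow : PySem.Str.lower (PySem.Str.strip (String.ofList t)) ≠ w := by
      intro he
      apply h
      rw [← hstrip, ← PySem.Str.toList_lower, he]
    have l1 : (PySem.Str.lower (PySem.Str.strip (String.ofList t)) == w) = false :=
      beq_eq_false_iff_ne.mpr hlow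
    have l2 : (PySem.Chars.lower (PySem.Chars.strip t) == w.toList) = false :=
      beq_eq_false_iff_ne.mpr h
    rw [l1, l2]; simp

-- ===== VERDICT (by name: the statement is the Claim_ definition above) =====
theorem resolve_requested_types_spec : Claim_equal_resolve_requested_types := by
  intro type_param _
  unfold Spec_resolve_requested_types resolve_requested_types resolve_requested_types_alt
  rcases type_param with _ | s
  · rfl
  · by_cases hs : s = ""
    · subst hs; decide
    · simp only [if_neg hs]
      rw [pvScan_toks, flush_fold]
      have htoks : (PySem.Str.split? s ",").getD [] = (pvToks [] s.toList).map String.ofList := by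
        simp [PySem.Str.split?, PySem.Chars.split?, splitOn_toks]
      rw [htoks, A_fold_contains, A_fold_contains]
      simp only [List.any_map, Function.comp_def]
      rw [funext (pred_bridge "students" (by decide)), funext (pred_bridge "group" (by decide))]
      simp [PySem.Set.contains_eq_listContains, PySem.Set.empty]
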